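-- pv_equiv track=rewrite | github.com/edwardtintu/-Hybrid-Knowledge-Driven-Candidate-Evaluation-System | resume_analysis/section_analyzer.py | analyze_resume_sections
-- ===== SOURCE A (Python) =====
-- SECTION_HEADERS = {
--     "education": ["education", "academic background", "academic"],
--     "experience": ["experience", "work experience", "employment", "professional experience", "history"],
--     "projects": ["projects", "project experience", "academic projects"],
--     "skills": ["skills", "technical skills", "core competencies"],
--     "certifications": ["certifications", "certification", "licenses"]
-- }
--
-- def analyze_resume_sections(text):
--     """
--     Scans a raw resume string and structurally decomposes it into distinct sections
--     based on common ATS header keywords.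
--     """
--     text = text.lower()
--
--     sections = {
--         "education": "",
--         "experience": "",
--         "projects": "",
--         "skills": "",
--         "certifications": "",
--         "objective": "" # Added an extra catch-all for top-level summaries
--     }
--
--     lines = text.split("\n")
--
--     # Assume everything before the first section is the Objective/Summary
--     current_section = "objective"
--
--     for line in lines:
--         line_clean = line.strip()
--
--         # If it's empty, just append the newline and continue
--         if not line_clean:
--             if current_section:
--                 sections[current_section] += "\n"
--             continue
--
--         # Look for headers
--         # We check if the line *is exactly* a keyword,
--         # or if it's very short and contains a keyword to avoid false positives mid-sentence
--         header_found = False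
--         if len(line_clean) < 40:  # Headers are usually short lines
--             for section, keywords in SECTION_HEADERS.items():
--                 if any(k in line_clean for k in keywords):
--                     current_section = section
--                     header_found = True
--                     break
--
--         # Don't append the actual header string to the section content
--         if not header_found and current_section:
--             sections[current_section] += line + "\n"
--
--     # Clean up excess whitespace
--     for k in sections:
--         sections[k] = sections[k].strip()
--
--     return sections
-- ===== SOURCE B (Python) =====
-- SECTION_HEADERS = {
--     "education": ["education", "academic background", "academic"],
--     "experience": ["experience", "work experience", "employment", "professional experience", "history"],
--     "projects": ["projects", "project experience", "academic projects"],
--     "skills": ["skills", "technical skills", "core competencies"],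
--     "certifications": ["certifications", "certification", "licenses"]
-- }
--
-- _KEYS = ("education", "experience", "projects", "skills", "certifications", "objective")
--
--
-- def _header_of(line_clean):
--     """Return the section whose keyword occurs in this short stripped line, else None."""
--     for section, keywords in SECTION_HEADERS.items():
--         if any(k in line_clean for k in keywords):
--             return section
--     return None
--
--
-- def analyze_resume_sections(text):
--     # Pass 1: label every line — headers switch the running section, other
--     # lines are recorded as (section, piece) pairs.
--     labels = []
--     current = "objective"
--     for line in text.lower().split("\n"):
--         clean = line.strip()
--         section = _header_of(clean) if clean and len(clean) < 40 else None
--         if section is not None: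
--             current = section
--         else:
--             labels.append((current, "\n" if not clean else line + "\n"))
--     # Pass 2: group the pieces by section and strip each section's text.
--     return {k: "".join(p for s, p in labels if s == k).strip() for k in _KEYS}
-- ===== Notes on version B (the rewrite author's own statement) =====
-- stated objective: alternative
-- what changed: B replaces A's single pass that mutates a six-key dict in place with a two-phase decomposition: a labelling pass that assigns each non-header line's piece to a section, then a grouping pass that joins the pieces per section and strips them.
import Mathlib
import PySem

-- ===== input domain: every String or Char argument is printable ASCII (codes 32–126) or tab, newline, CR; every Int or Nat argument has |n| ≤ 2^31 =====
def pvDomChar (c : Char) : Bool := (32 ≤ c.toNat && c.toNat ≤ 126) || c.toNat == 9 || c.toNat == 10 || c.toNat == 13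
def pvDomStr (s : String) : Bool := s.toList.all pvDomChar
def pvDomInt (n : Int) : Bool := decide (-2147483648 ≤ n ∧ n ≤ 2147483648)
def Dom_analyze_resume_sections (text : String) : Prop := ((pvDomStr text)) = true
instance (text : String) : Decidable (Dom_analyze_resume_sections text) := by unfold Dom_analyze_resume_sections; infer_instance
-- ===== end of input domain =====

-- B separates boundary detection from content assembly: one labelling pass over the lines,
-- then grouping by section — same result as A's in-place dict accumulation (objective: alternative).

-- ===== PORT A =====
def SECTION_HEADERS : List (String × List String) := [
  ("education", ["education", "academic background", "academic"]),
  ("experience", ["experience", "work experience", "employment", "professional experience", "history"]),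
  ("projects", ["projects", "project experience", "academic projects"]),
  ("skills", ["skills", "technical skills", "core competencies"]),
  ("certifications", ["certifications", "certification", "licenses"])]

-- the body of A's 'for line in lines' loop, acting on the (sections, current_section) state
def pvStepA (st : PySem.Dict String String × String) (line : String) :
    PySem.Dict String String × String :=
  let sections := st.1
  let current_section := st.2
  let line_clean := PySem.Str.strip line
  if line_clean = "" then
    (if current_section ≠ "" then (sections.modify current_section "" (· ++ "\n"), current_section) else st)
  else
    -- 'for section, keywords in SECTION_HEADERS.items(): … break' = first matching entry
    let hdr : Option (String × List String) :=
      if PySem.Str.len line_clean < 40 then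
        SECTION_HEADERS.find? (fun p => p.2.any (fun k => PySem.Str.isIn k line_clean))
      else none
    match hdr with
    | some p => (sections, p.1)
    | none =>
      if current_section ≠ "" then
        (sections.modify current_section "" (· ++ (line ++ "\n")), current_section)
      else (sections, current_section)

def analyze_resume_sections (text : String) : List (String × String) :=
  let textL := PySem.Str.lower text
  let sections0 : PySem.Dict String String :=
    PySem.Dict.ofList [("education", ""), ("experience", ""), ("projects", ""),
                       ("skills", ""), ("certifications", ""), ("objective", "")]
  -- text.split("\n"): exact via PySem.Chars.splitOn (separator is nonempty)
  let lines := (PySem.Chars.splitOn textL.toList "\n".toList).map String.ofList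
  let st := lines.foldl pvStepA (sections0, "objective")
  st.1.items.map (fun p => (p.1, PySem.Str.strip p.2))

-- ===== PORT B =====
def pvKeys : List String := ["education", "experience", "projects", "skills", "certifications", "objective"]

def pvHeaderOf (line_clean : String) : Option String :=
  (SECTION_HEADERS.find? (fun p => p.2.any (fun k => PySem.Str.isIn k line_clean))).map (fun p => p.1)

-- the body of B's labelling pass, acting on the (labels, current) state
def pvStepB (st : List (String × String) × String) (line : String) :
    List (String × String) × String :=
  let clean := PySem.Str.strip line
  let sec := if clean ≠ "" ∧ PySem.Str.len clean < 40 then pvHeaderOf clean else none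
  match sec with
  | some s => (st.1, s)
  | none => (st.1 ++ [(st.2, if clean = "" then "\n" else line ++ "\n")], st.2)

def analyze_resume_sections_alt (text : String) : List (String × String) :=
  let lines := (PySem.Chars.splitOn (PySem.Str.lower text).toList "\n".toList).map String.ofList
  let labels := (lines.foldl pvStepB ([], "objective")).1
  pvKeys.map (fun k =>
    (k, PySem.Str.strip (PySem.Str.join "" ((labels.filter (fun p => p.1 == k)).map (fun p => p.2)))))

-- ===== PRECONDITION & SPEC =====
def Spec_analyze_resume_sections (text : String) (out : List (String × String)) : Prop := out = analyze_resume_sections_alt text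
instance (text : String) (out : List (String × String)) : Decidable (Spec_analyze_resume_sections text out) := by unfold Spec_analyze_resume_sections; infer_instance

-- ===== CLAIM (what is proved, stated in full; the proofs are below) =====
def Claim_equal_analyze_resume_sections : Prop := ∀ (text : String), Dom_analyze_resume_sections text → Spec_analyze_resume_sections text (analyze_resume_sections text)

-- ===== LEMMAS AND PROOFS =====

-- the labelled content pieces the line list generates, starting in section cs
def pvEmit (cs : String) : List String → List (String × String)
  | [] => []
  | line :: rest =>
    let clean := PySem.Str.strip line
    match (if clean ≠ "" ∧ PySem.Str.len clean < 40 then pvHeaderOf clean else none) with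
    | some s => pvEmit s rest
    | none => (cs, if clean = "" then "\n" else line ++ "\n") :: pvEmit cs rest

-- the text collected for section k from a label list
def pvJ (k : String) (lbls : List (String × String)) : String :=
  PySem.Str.join "" ((lbls.filter (fun p => p.1 == k)).map (fun p => p.2))

theorem pv_flatten_intersperse_nil {α : Type} (l : List (List α)) :
    (List.intersperse [] l).flatten = l.flatten := by
  induction l with
  | nil => rfl
  | cons h t ih => cases t with
    | nil => simp
    | cons a b => simp_all [List.intersperse]

theorem pv_join_cons (x : String) (xs : List String) :
    PySem.Str.join "" (x :: xs) = x ++ PySem.Str.join "" xs := by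
  apply String.toList_inj.mp
  simp [PySem.Str.join, PySem.Chars.join, List.intercalate, pv_flatten_intersperse_nil]

theorem pvJ_cons (k s piece : String) (rest : List (String × String)) :
    pvJ k ((s, piece) :: rest) = if s = k then piece ++ pvJ k rest else pvJ k rest := by
  by_cases h : s = k <;> simp [pvJ, h, pv_join_cons]

theorem pvHeaderOf_mem {c s : String} (h : pvHeaderOf c = some s) : s ∈ pvKeys := by
  unfold pvHeaderOf at h
  rcases Option.map_eq_some_iff.mp h with ⟨p, hp, rfl⟩
  have hm := List.mem_of_find?_eq_some hp
  simp only [SECTION_HEADERS, List.mem_cons, List.not_mem_nil, or_false] at hm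
  rcases hm with rfl | rfl | rfl | rfl | rfl <;> simp [pvKeys]

theorem pv_foldB (lines : List String) (labels : List (String × String)) (cs : String) :
    (lines.foldl pvStepB (labels, cs)).1 = labels ++ pvEmit cs lines := by
  induction lines generalizing labels cs with
  | nil => simp [pvEmit]
  | cons line rest ih =>
    rw [List.foldl_cons]
    cases hsec : (if PySem.Str.strip line ≠ "" ∧ PySem.Str.len (PySem.Str.strip line) < 40
        then pvHeaderOf (PySem.Str.strip line) else none) with
    | some s =>
      have hstep : pvStepB (labels, cs) line = (labels, s) := by simp only [pvStepB, hsec]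
      have hemit : pvEmit cs (line :: rest) = pvEmit s rest := by simp only [pvEmit, hsec]
      rw [hstep, hemit, ih]
    | none =>
      have hstep : pvStepB (labels, cs) line =
          (labels ++ [(cs, if PySem.Str.strip line = "" then "\n" else line ++ "\n")], cs) := by
        simp only [pvStepB, hsec]
      have hemit : pvEmit cs (line :: rest) =
          (cs, if PySem.Str.strip line = "" then "\n" else line ++ "\n") :: pvEmit cs rest := by
        simp only [pvEmit, hsec]
      rw [hstep, hemit, ih, List.append_assoc, List.singleton_append]

set_option maxHeartbeats 2000000 in
theorem pv_foldA (lines : List String) (d : PySem.Dict String String) (cs : String)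
    (hk : d.keys = pvKeys) (hcs : cs ∈ pvKeys) :
    (lines.foldl pvStepA (d, cs)).1.keys = pvKeys ∧
    ∀ k ∈ pvKeys, (lines.foldl pvStepA (d, cs)).1.getD k "" = d.getD k "" ++ pvJ k (pvEmit cs lines) := by
  induction lines generalizing d cs with
  | nil =>
    refine ⟨by simpa using hk, fun k _ => ?_⟩
    have : pvJ k (pvEmit cs []) = "" := rfl
    simp [this]
  | cons line rest ih =>
    rw [List.foldl_cons]
    have hcsne : cs ≠ "" := by rintro rfl; revert hcs; decide
    have hcont : d.contains cs = true := by
      rw [PySem.Dict.contains_iff_mem_keys, hk]; exact hcs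
    by_cases hblank : PySem.Str.strip line = ""
    · -- blank line: append "\n" to the current section
      have hstep : pvStepA (d, cs) line = (d.modify cs "" (· ++ "\n"), cs) := by
        simp only [pvStepA]; rw [if_pos hblank, if_pos hcsne]
      have hemit : pvEmit cs (line :: rest) = (cs, "\n") :: pvEmit cs rest := by
        simp [pvEmit, hblank]
      have hk' : (d.modify cs "" (· ++ "\n")).keys = pvKeys := by
        rw [PySem.Dict.keys_modify, PySem.Dict.keys_insert_of_contains _ _ hcont, hk]
      obtain ⟨h1, h2⟩ := ih (d.modify cs "" (· ++ "\n")) cs hk' hcs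
      rw [hstep]
      refine ⟨h1, fun k hkk => ?_⟩
      rw [h2 k hkk, hemit, pvJ_cons, PySem.Dict.getD_modify]
      by_cases hke : k = cs
      · subst hke; rw [if_pos rfl, if_pos rfl, String.append_assoc]
      · rw [if_neg hke, if_neg (fun h => hke h.symm)]
    · by_cases hlen : PySem.Str.len (PySem.Str.strip line) < 40
      · cases hfind : SECTION_HEADERS.find?
            (fun p => p.2.any (fun k => PySem.Str.isIn k (PySem.Str.strip line))) with
        | some p =>
          -- header line: switch section, emit nothing
          have hstep : pvStepA (d, cs) line = (d, p.1) := by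
            simp only [pvStepA]; rw [if_neg hblank, if_pos hlen, hfind]
          have hhdr : pvHeaderOf (PySem.Str.strip line) = some p.1 := by
            unfold pvHeaderOf; rw [hfind]; rfl
          have hemit : pvEmit cs (line :: rest) = pvEmit p.1 rest := by
            simp only [pvEmit, if_pos (And.intro hblank hlen), hhdr]
          rw [hstep, hemit]
          exact ih d p.1 hk (pvHeaderOf_mem hhdr)
        | none =>
          -- ordinary content line
          have hstep : pvStepA (d, cs) line = (d.modify cs "" (· ++ (line ++ "\n")), cs) := by
            simp only [pvStepA]; rw [if_neg hblank, if_pos hlen, hfind, if_pos hcsne]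
          have hhdr : pvHeaderOf (PySem.Str.strip line) = none := by
            unfold pvHeaderOf; rw [hfind]; rfl
          have hemit : pvEmit cs (line :: rest) = (cs, line ++ "\n") :: pvEmit cs rest := by
            simp only [pvEmit, if_pos (And.intro hblank hlen), hhdr, if_neg hblank]
          have hk' : (d.modify cs "" (· ++ (line ++ "\n"))).keys = pvKeys := by
            rw [PySem.Dict.keys_modify, PySem.Dict.keys_insert_of_contains _ _ hcont, hk]
          obtain ⟨h1, h2⟩ := ih (d.modify cs "" (· ++ (line ++ "\n"))) cs hk' hcs
          rw [hstep]
          refine ⟨h1, fun k hkk => ?_⟩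
          rw [h2 k hkk, hemit, pvJ_cons, PySem.Dict.getD_modify]
          by_cases hke : k = cs
          · subst hke; rw [if_pos rfl, if_pos rfl, String.append_assoc]
          · rw [if_neg hke, if_neg (fun h => hke h.symm)]
      · -- long line: never a header
        have hstep : pvStepA (d, cs) line = (d.modify cs "" (· ++ (line ++ "\n")), cs) := by
          simp only [pvStepA]; rw [if_neg hblank, if_neg hlen, if_pos hcsne]
        have hemit : pvEmit cs (line :: rest) = (cs, line ++ "\n") :: pvEmit cs rest := by
          simp only [pvEmit,
            if_neg (fun h : _ ∧ _ => hlen h.2), if_neg hblank]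
        have hk' : (d.modify cs "" (· ++ (line ++ "\n"))).keys = pvKeys := by
          rw [PySem.Dict.keys_modify, PySem.Dict.keys_insert_of_contains _ _ hcont, hk]
        obtain ⟨h1, h2⟩ := ih (d.modify cs "" (· ++ (line ++ "\n"))) cs hk' hcs
        rw [hstep]
        refine ⟨h1, fun k hkk => ?_⟩
        rw [h2 k hkk, hemit, pvJ_cons, PySem.Dict.getD_modify]
        by_cases hke : k = cs
        · subst hke; rw [if_pos rfl, if_pos rfl, String.append_assoc]
        · rw [if_neg hke, if_neg (fun h => hke h.symm)]

-- ===== VERDICT (by name: the statement is the Claim_ definition above) =====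
theorem analyze_resume_sections_spec : Claim_equal_analyze_resume_sections := by
  intro text _
  unfold Spec_analyze_resume_sections analyze_resume_sections analyze_resume_sections_alt
  simp only []
  obtain ⟨h1, h2⟩ := pv_foldA
    ((PySem.Chars.splitOn (PySem.Str.lower text).toList "\n".toList).map String.ofList)
    (PySem.Dict.ofList [("education", ""), ("experience", ""), ("projects", ""),
                        ("skills", ""), ("certifications", ""), ("objective", "")])
    "objective" rfl (by decide)
  rw [pv_foldB, List.nil_append,
      PySem.Dict.items_eq_map_keys _ (by rw [h1]; decide) "", h1, List.map_map]
  apply List.map_congr_left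
  intro k hkk
  simp only [Function.comp_apply]
  rw [h2 k hkk]
  have h0 : (PySem.Dict.ofList [("education", ""), ("experience", ""), ("projects", ""),
      ("skills", ""), ("certifications", ""), ("objective", "")] :
      PySem.Dict String String).getD k "" = "" := by
    rcases (by simpa [pvKeys] using hkk : k = "education" ∨ k = "experience" ∨ k = "projects"
      ∨ k = "skills" ∨ k = "certifications" ∨ k = "objective") with rfl | rfl | rfl | rfl | rfl | rfl <;> rfl
  rw [h0, String.empty_append]
  rfl
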